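-- pv_equiv track=rewrite | github.com/yiouyou/RePolyA | repolya/paper/_digest/split_sections.py | split_on_duplicate_lines
-- ===== SOURCE A (Python) =====
-- def split_on_duplicate_lines(text):
--     lines = text.split('\n')
--     seen = set()
--     duplicate_lines = set()
--     splits = []
--     current_split = []
--     # First pass: Identify all duplicate lines
--     for line in lines:
--         if line in seen:
--             duplicate_lines.add(line)
--         else:
--             seen.add(line)
--     # Second pass: Split text and remove duplicates
--     seen = set()
--     for line in lines:
--         if line in duplicate_lines:
--             if current_split:
--                 splits.append('\n'.join(current_split).strip())
--                 current_split = []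
--             seen = set()  # Clear 'seen' for the new section
--         else:
--             current_split.append(line)
--             seen.add(line)
--     if current_split:
--         splits.append('\n'.join(current_split).strip())
--     return splits
-- ===== SOURCE B (Python) =====
-- def split_on_duplicate_lines(text):
--     lines = text.split('\n')
--     counts = {}
--     for l in lines:
--         counts[l] = counts.get(l, 0) + 1
--     splits = []
--     i = 0
--     n = len(lines)
--     while i < n:
--         if counts[lines[i]] > 1:
--             i += 1
--         else:
--             j = i
--             while j < n and counts[lines[j]] == 1:
--                 j += 1
--             splits.append('\n'.join(lines[i:j]).strip())
--             i = j
--     return splits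
-- ===== Notes on version B (the rewrite author's own statement) =====
-- stated objective: alternative
-- what changed: A's incremental accumulate-and-flush scan (which also maintains a dead bookkeeping set) is replaced by a counting dict plus a two-pointer while loop that emits one stripped join per maximal run of non-duplicate lines.
import Mathlib
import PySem

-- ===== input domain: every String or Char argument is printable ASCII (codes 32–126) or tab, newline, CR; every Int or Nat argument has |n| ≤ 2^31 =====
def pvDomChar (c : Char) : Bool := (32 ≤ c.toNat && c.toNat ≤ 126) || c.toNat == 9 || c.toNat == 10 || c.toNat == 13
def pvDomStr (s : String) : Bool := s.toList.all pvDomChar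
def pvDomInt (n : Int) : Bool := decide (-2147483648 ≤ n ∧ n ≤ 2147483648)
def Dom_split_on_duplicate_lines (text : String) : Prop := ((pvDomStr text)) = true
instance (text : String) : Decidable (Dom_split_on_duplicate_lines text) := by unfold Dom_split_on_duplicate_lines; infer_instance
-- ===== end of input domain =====

-- B replaces A's accumulate-and-flush scan (which also maintains a dead bookkeeping set) by a counting dict plus a
-- two-pointer span scan over maximal runs of non-duplicate lines; objective: alternative decomposition.

-- ===== PORT A =====
-- first pass body: (seen, duplicate_lines)
def pvStep1 (st : PySem.Set String × PySem.Set String) (line : String) :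
    PySem.Set String × PySem.Set String :=
  if PySem.Set.contains st.1 line then (st.1, PySem.Set.add st.2 line)
  else (PySem.Set.add st.1 line, st.2)

-- second pass body: (splits, current_split, seen); the duplicate test is the parameter p
def pvStepA (p : String → Bool) (st : List String × List String × PySem.Set String)
    (line : String) : List String × List String × PySem.Set String :=
  if p line then
    if st.2.1 ≠ [] then
      (st.1 ++ [PySem.Str.strip (PySem.Str.join "\n" st.2.1)], [], PySem.Set.empty)
    else (st.1, [], PySem.Set.empty)
  else (st.1, st.2.1 ++ [line], PySem.Set.add st.2.2 line)

-- trailing 'if current_split: splits.append(...)'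
def pvFinishA (st : List String × List String × PySem.Set String) : List String :=
  if st.2.1 ≠ [] then st.1 ++ [PySem.Str.strip (PySem.Str.join "\n" st.2.1)] else st.1

def split_on_duplicate_lines (text : String) : List String :=
  let lines := (PySem.Str.split? text "\n").getD []  -- sep is the non-empty literal "\n", so split? is always some
  let dup := (lines.foldl pvStep1 (PySem.Set.empty, PySem.Set.empty)).2
  pvFinishA (lines.foldl (pvStepA (PySem.Set.contains dup)) ([], [], PySem.Set.empty))

-- ===== PORT B =====
-- inner while of Source B: collect the run of lines with count == 1 (¬p), return (run, rest)
def pvSpanB (p : String → Bool) : List String → List String × List String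
  | [] => ([], [])
  | l :: rest =>
    if p l then ([], l :: rest)
    else
      let s := pvSpanB p rest
      (l :: s.1, s.2)

theorem pvSpanB_snd_len (p : String → Bool) (ls : List String) :
    (pvSpanB p ls).2.length ≤ ls.length := by
  induction ls with
  | nil => simp [pvSpanB]
  | cons l rest ih =>
    simp only [pvSpanB]
    split
    · simp
    · simp
      omega

-- outer while of Source B: skip duplicate lines, emit one stripped join per run
def pvGoB (p : String → Bool) : List String → List String
  | [] => []
  | l :: rest =>
    if p l then pvGoB p rest
    else
      let s := pvSpanB p rest
      PySem.Str.strip (PySem.Str.join "\n" (l :: s.1)) :: pvGoB p s.2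
termination_by ls => ls.length
decreasing_by
  all_goals (have := pvSpanB_snd_len p rest; simp; try omega)

-- counts[l] built with dict.get(l, 0) + 1; lines[i] is always a key, so getD is exact here
def split_on_duplicate_lines_alt (text : String) : List String :=
  let lines := (PySem.Str.split? text "\n").getD []  -- sep is the non-empty literal "\n", so split? is always some
  let counts := lines.foldl (fun d l => PySem.Dict.insert d l (PySem.Dict.getD d l 0 + 1))
    (PySem.Dict.empty : PySem.Dict String Int)
  pvGoB (fun l => decide (1 < PySem.Dict.getD counts l 0)) lines

-- ===== PRECONDITION & SPEC =====
def Spec_split_on_duplicate_lines (text : String) (out : List String) : Prop := out = split_on_duplicate_lines_alt text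
instance (text : String) (out : List String) : Decidable (Spec_split_on_duplicate_lines text out) := by unfold Spec_split_on_duplicate_lines; infer_instance

-- ===== CLAIM (what is proved, stated in full; the proofs are below) =====
def Claim_equal_split_on_duplicate_lines : Prop := ∀ (text : String), Dom_split_on_duplicate_lines text → Spec_split_on_duplicate_lines text (split_on_duplicate_lines text)

-- ===== LEMMAS AND PROOFS =====

-- pvSpanB is takeWhile/dropWhile on the negated predicate
theorem pvSpanB_eq (p : String → Bool) (ls : List String) :
    pvSpanB p ls = (ls.takeWhile (fun l => !p l), ls.dropWhile (fun l => !p l)) := by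
  induction ls with
  | nil => simp [pvSpanB]
  | cons l rest ih =>
    by_cases h : p l <;> simp [pvSpanB, h, ih]

-- the result A's second pass (started in state (splits, cur, seen)) finalizes to
def pvEmit (p : String → Bool) (cur : List String) (ls : List String) : List String :=
  if cur = [] then pvGoB p ls
  else PySem.Str.strip (PySem.Str.join "\n" (cur ++ ls.takeWhile (fun l => !p l)))
        :: pvGoB p (ls.dropWhile (fun l => !p l))

theorem stepA_pos_flush (p : String → Bool) {l : String} (h : p l = true)
    {cur : List String} (hc : cur ≠ []) (splits : List String) (seen : PySem.Set String) :
    pvStepA p (splits, cur, seen) l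
      = (splits ++ [PySem.Str.strip (PySem.Str.join "\n" cur)], [], PySem.Set.empty) := by
  simp [pvStepA, h, hc]

theorem stepA_pos_nil (p : String → Bool) {l : String} (h : p l = true)
    (splits : List String) (seen : PySem.Set String) :
    pvStepA p (splits, [], seen) l = (splits, [], PySem.Set.empty) := by
  simp [pvStepA, h]

theorem stepA_neg (p : String → Bool) {l : String} (h : p l = false)
    (cur splits : List String) (seen : PySem.Set String) :
    pvStepA p (splits, cur, seen) l = (splits, cur ++ [l], PySem.Set.add seen l) := by
  simp [pvStepA, h]

-- A's flush loop plus its trailing flush computes pvEmit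
theorem foldA_emit (p : String → Bool) (ls : List String) :
    ∀ (cur splits : List String) (seen : PySem.Set String),
    pvFinishA (ls.foldl (pvStepA p) (splits, cur, seen)) = splits ++ pvEmit p cur ls := by
  induction ls with
  | nil =>
    intro cur splits seen
    by_cases hc : cur = [] <;> simp [pvFinishA, pvEmit, pvGoB, hc]
  | cons l rest ih =>
    intro cur splits seen
    rw [List.foldl_cons]
    by_cases h : p l
    · by_cases hc : cur = []
      · subst hc
        rw [stepA_pos_nil p h, ih]
        simp [pvEmit, pvGoB, h]
      · rw [stepA_pos_flush p h hc, ih]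
        simp [pvEmit, pvGoB, h, hc]
    · rw [stepA_neg p (by simpa using h), ih]
      by_cases hc : cur = []
      · subst hc
        simp [pvEmit, pvGoB, h, pvSpanB_eq]
      · simp [pvEmit, h, hc]

-- A's first pass: membership in 'duplicate_lines' given start state (s, d)
theorem foldDup_mem (ls : List String) :
    ∀ (s d : PySem.Set String) (x : String),
    (x ∈ (ls.foldl pvStep1 (s, d)).2 ↔ x ∈ d ∨ (x ∈ s ∧ x ∈ ls) ∨ 2 ≤ ls.count x) := by
  induction ls with
  | nil => intro s d x; simp
  | cons l rest ih =>
    intro s d x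
    rw [List.foldl_cons]
    by_cases h : PySem.Set.contains s l
    · have hl : l ∈ s := by simpa [PySem.Set.contains] using h
      rw [show pvStep1 (s, d) l = (s, PySem.Set.add d l) from by unfold pvStep1; rw [if_pos h], ih]
      by_cases hx : x = l
      · subst hx
        simp [PySem.Set.mem_add, hl]
      · have hlx : ¬(l = x) := fun hh => hx hh.symm
        simp [PySem.Set.mem_add, hx, hlx]
    · have hl : l ∉ s := by simpa [PySem.Set.contains] using h
      rw [show pvStep1 (s, d) l = (PySem.Set.add s l, d) from by unfold pvStep1; rw [if_neg h], ih]
      by_cases hx : x = l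
      · subst hx
        by_cases hd : x ∈ d
        · simp [hd]
        · simp [hd, hl, List.count_cons_self, ← List.count_pos_iff]
          omega
      · have hlx : ¬(l = x) := fun hh => hx hh.symm
        simp [PySem.Set.mem_add, hx, hlx]

-- the two duplicate tests agree: set-based (A) and count-based (B)
theorem pred_eq (lines : List String) :
    PySem.Set.contains (lines.foldl pvStep1 (PySem.Set.empty, PySem.Set.empty)).2
    = (fun l => decide (1 < PySem.Dict.getD
        (lines.foldl (fun d l => PySem.Dict.insert d l (PySem.Dict.getD d l 0 + 1))
          (PySem.Dict.empty : PySem.Dict String Int)) l 0)) := by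
  funext x
  have h1 := foldDup_mem lines PySem.Set.empty PySem.Set.empty x
  rw [Bool.eq_iff_iff]
  simp only [PySem.Set.contains, List.contains_iff_mem, decide_eq_true_eq]
  rw [h1]
  simp [PySem.Dict.getD_foldl_insert_add_one, PySem.Dict.getD_empty, PySem.Set.empty]
  omega

-- ===== VERDICT (by name: the statement is the Claim_ definition above) =====
theorem split_on_duplicate_lines_spec : Claim_equal_split_on_duplicate_lines := by
  intro text _
  unfold Spec_split_on_duplicate_lines split_on_duplicate_lines split_on_duplicate_lines_alt
  rw [foldA_emit, pred_eq]
  simp [pvEmit]
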